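-- pv_equiv track=rewrite | github.com/su-memory/su-memory-sdk | src/su_memory/_sys/_energy_relations.py | get_suppress_chain
-- ===== SOURCE A (Python) =====
-- from typing import Dict, List, Optional, Tuple, Any
--
-- ENERGY_SUPPRESS: Dict[str, str] = {
--     "wood": "earth",     # 木克土
--     "earth": "water",    # 土克水
--     "water": "fire",     # 水克火
--     "fire": "metal",     # 火克金
--     "metal": "wood",     # 金克木
-- }
--
-- def get_suppress_chain(start: str, steps: int = 5) -> List[str]:
--     """
--     Get the suppress chain starting from an element.
--
--     Args:
--         start: Starting element
--         steps: Number of steps (default: 5 for full cycle)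
--
--     Returns:
--         List of elements in sequence
--     """
--     chain = [start]
--     current = start
--
--     for _ in range(steps - 1):
--         next_element = ENERGY_SUPPRESS.get(current)
--         if next_element is None:
--             break
--         chain.append(next_element)
--         current = next_element
--
--     return chain
-- ===== SOURCE B (Python) =====
-- _ORDER = ["wood", "earth", "water", "fire", "metal"]
--
-- def get_suppress_chain(start, steps=5):
--     try:
--         i = _ORDER.index(start)
--     except ValueError:
--         return [start]
--     n = steps if steps >= 1 else 1
--     return [_ORDER[(i + k) % 5] for k in range(n)]
-- ===== Notes on version B (the rewrite author's own statement) =====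
-- stated objective: simpler
-- what changed: B replaces the step-by-step dict-following loop with modular index arithmetic over the precomputed 5-cycle list, generating the chain as a single range comprehension.
import Mathlib
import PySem

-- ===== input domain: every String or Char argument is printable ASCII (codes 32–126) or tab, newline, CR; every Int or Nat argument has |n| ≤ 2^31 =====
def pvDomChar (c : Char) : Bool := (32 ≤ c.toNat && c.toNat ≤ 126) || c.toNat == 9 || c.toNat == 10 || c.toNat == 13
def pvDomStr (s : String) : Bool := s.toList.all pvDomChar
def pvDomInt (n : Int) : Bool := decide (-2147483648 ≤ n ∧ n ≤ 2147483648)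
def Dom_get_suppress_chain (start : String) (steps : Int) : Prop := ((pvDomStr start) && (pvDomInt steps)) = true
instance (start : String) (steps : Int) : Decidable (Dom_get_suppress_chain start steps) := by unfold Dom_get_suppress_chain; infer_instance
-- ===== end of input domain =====

-- B follows the suppress cycle by modular index arithmetic over the fixed 5-element
-- order instead of A's step-by-step dict lookups; objective: simpler (same cost).

-- ===== PORT A =====
-- ENERGY_SUPPRESS module constant
def ENERGY_SUPPRESS : PySem.Dict String String :=
  PySem.Dict.ofList [("wood", "earth"), ("earth", "water"), ("water", "fire"), ("fire", "metal"), ("metal", "wood")]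

-- the 'for _ in range(steps - 1)' loop with its break, state = (chain, current)
def suppressLoop : Nat → List String → String → List String
  | 0, chain, _ => chain
  | n + 1, chain, current =>
    match ENERGY_SUPPRESS.get? current with
    | none => chain
    | some next_element => suppressLoop n (chain ++ [next_element]) next_element

def get_suppress_chain (start : String) (steps : Int) : List String :=
  suppressLoop (steps - 1).toNat [start] start

-- ===== PORT B =====
def pvORDER : List String := ["wood", "earth", "water", "fire", "metal"]

def get_suppress_chain_alt (start : String) (steps : Int) : List String :=
  match PySem.List.index? pvORDER start with
  | none => [start]
  | some i =>
    -- n = steps if steps >= 1 else 1, inlined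
    (PySem.List.pyRange 0 (if steps ≥ 1 then steps else 1) 1).map (fun k => PySem.List.pyGetD pvORDER (PySem.Int.mod ((i : Int) + k) 5) "")

-- ===== PRECONDITION & SPEC =====
def Spec_get_suppress_chain (start : String) (steps : Int) (out : List String) : Prop := out = get_suppress_chain_alt start steps
instance (start : String) (steps : Int) (out : List String) : Decidable (Spec_get_suppress_chain start steps out) := by unfold Spec_get_suppress_chain; infer_instance

-- ===== CLAIM (what is proved, stated in full; the proofs are below) =====
def Claim_equal_get_suppress_chain : Prop := ∀ (start : String) (steps : Int), Dom_get_suppress_chain start steps → Spec_get_suppress_chain start steps (get_suppress_chain start steps)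

-- ===== LEMMAS AND PROOFS =====

-- cyclic successor as a function of a natural index
def cyc (j : Nat) : String := pvORDER.getD (j % 5) ""

lemma get?_cyc (j : Nat) : ENERGY_SUPPRESS.get? (cyc j) = some (cyc (j + 1)) := by
  have h5 : j % 5 = 0 ∨ j % 5 = 1 ∨ j % 5 = 2 ∨ j % 5 = 3 ∨ j % 5 = 4 := by omega
  have hsucc : (j + 1) % 5 = (j % 5 + 1) % 5 := by omega
  rcases h5 with h | h | h | h | h <;> simp [cyc, h, hsucc] <;> decide

lemma suppressLoop_cyc (n : Nat) : ∀ (j : Nat) (acc : List String),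
    suppressLoop n acc (cyc j) = acc ++ (List.range n).map (fun k => cyc (j + 1 + k)) := by
  induction n with
  | zero => intro j acc; simp [suppressLoop]
  | succ m ih =>
    intro j acc
    rw [suppressLoop, get?_cyc]
    show suppressLoop m (acc ++ [cyc (j + 1)]) (cyc (j + 1)) = _
    rw [ih (j + 1), List.range_succ_eq_map]
    simp [List.map_map, Function.comp]
    intro a _; congr 1; omega

lemma not_mem_get?_none {s : String} (h : s ∉ pvORDER) : ENERGY_SUPPRESS.get? s = none := by
  simp only [pvORDER, List.mem_cons, List.not_mem_nil, or_false, not_or] at h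
  obtain ⟨h1, h2, h3, h4, h5⟩ := h
  rw [PySem.Dict.get?_eq_none_iff_not_mem_keys]
  have hkeys : ENERGY_SUPPRESS.keys = pvORDER := by decide
  rw [hkeys]
  simp only [pvORDER, List.mem_cons, List.not_mem_nil, or_false, not_or]
  exact ⟨h1, h2, h3, h4, h5⟩

lemma cell_eq (j k : Nat) :
    PySem.List.pyGetD pvORDER (PySem.Int.mod ((j : Int) + ((0 : Int) + (k : Nat))) 5) "" = cyc (j + k) := by
  have h1 : (j : Int) + ((0 : Int) + (k : Nat)) = ((j + k : Nat) : Int) := by push_cast; ring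
  have h2 : PySem.Int.mod ((j + k : Nat) : Int) 5 = (((j + k) % 5 : Nat) : Int) := by
    rw [PySem.Int.mod_eq_emod_of_pos (by omega)]
    push_cast; rfl
  rw [h1, h2, PySem.List.pyGetD_natCast]
  rfl

lemma key_case (j : Nat) (hidx : PySem.List.index? pvORDER (cyc j) = some j) (steps : Int) :
    get_suppress_chain (cyc j) steps = get_suppress_chain_alt (cyc j) steps := by
  unfold get_suppress_chain get_suppress_chain_alt
  rw [hidx]
  dsimp only
  have hn : (if steps ≥ 1 then steps else 1) = (((steps - 1).toNat : Int) + 1) := by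
    split <;> omega
  rw [hn]
  set m := (steps - 1).toNat with hm
  rw [PySem.List.pyRange_one]
  have hlen : (((m : Int) + 1) - 0).toNat = m + 1 := by omega
  rw [hlen, suppressLoop_cyc m j [cyc j], List.map_map, List.range_succ_eq_map, List.map_cons]
  simp only [Function.comp_def, cell_eq]
  rw [List.map_map]
  simp only [Function.comp_def]
  show cyc j :: _ = _
  congr 1
  show ([] : List String) ++ _ = _
  rw [List.nil_append]
  apply List.map_congr_left
  intro k _
  congr 1
  omega

-- ===== VERDICT (by name: the statement is the Claim_ definition above) =====
theorem get_suppress_chain_spec : Claim_equal_get_suppress_chain := by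
  intro start steps _
  unfold Spec_get_suppress_chain
  by_cases hmem : start ∈ pvORDER
  · have h5 : start = cyc 0 ∨ start = cyc 1 ∨ start = cyc 2 ∨ start = cyc 3 ∨ start = cyc 4 := by
      simpa [pvORDER, cyc] using hmem
    rcases h5 with h | h | h | h | h <;> subst h <;>
      exact key_case _ (by decide) steps
  · unfold get_suppress_chain get_suppress_chain_alt
    have hidx : PySem.List.index? pvORDER start = none := by
      rw [PySem.List.index?_eq_none_iff]; exact hmem
    rw [hidx]
    cases h : (steps - 1).toNat with
    | zero => rfl
    | succ m => simp [suppressLoop, not_mem_get?_none hmem]
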